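/-
  THE TOP OF THE DECODER INVARIANT, AND THE GLUE: `VorbisOK`, `DeinitOK`, the PROGRAM POINTS of INVARIANTS §5, the transport `*f = p`.

  FILES.  Vorbis/Blocks.lean          THE ONE VOCABULARY: `Blk` / `BlkOK` / `BlkLive`, `Site`, `Block.Kept`, `AllKept`, `ObjEq`, `ObjSame`,
                                      `DecodeSame`, `Copied`, `Move`, `OB1`, `Group`, `Group.Moves / Carries / Stable / GoodGiven`
          Vorbis/State/Copied.lean    `AgreeOn` (two memories agree on the live set) and its bridge `AgreeOn.allKept`
          Vorbis/State/Window.lean    W1 – W3, the discard arm (D-7), the short final frame, W3′ = `FinishPre` and the four index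
                                      bounds of vorbis_finish_frame (pure `Int` lemmas, all by `omega`)
          Vorbis/State/Deinit.lean    `ZeroRange`, H0 – H5, `DeinitOK` with its 6 check-site lemmas, frame, transport
          Vorbis/State.lean           this file: everything over an ABSTRACT record of group predicates.
          Vorbis/Invariant.lean       THE REAL TOP: `groups len : Groups` built from the owners' definitions, `groups_laws`, hence the
                                      real `VorbisOK`, `SD k`, `P5`, `FB` …, and the fine decode-time frame lemma.
          Worked examples: Vorbis/StateTest.lean (with a model of `Groups` + `Laws`).

  1. THE GROUPS OF Q2 – Q7 ARE PARAMETERS.  `structure Groups` has one field per group predicate, with the agreed name and the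
     signature `Group = (Blk : Block → Prop) → (mem : Mem) → (f : Nat) → Prop` — NO group carries the live set: the SHAPE clauses
     are stated over the abstract "is an allocated block" (Vorbis/Blocks.lean), only USE lemmas need `BlkLive Blk Live`.
     (The arena's three are `Arena → Mem → Nat → Prop`: ALL their ghost state, Q2's arena and Q0's object list, is the abstract
     `A : G.Arena`.) `structure Groups.Laws G` lists what this file needs to know ABOUT them (which clause of a group is which
     H-clause, that each follows the object through `*f = p`, that each survives a change of memory outside the allocated blocks).
     The split of the groups is FINER than the list of owners where a program point needs it: `CB0` apart from `CodebookOK` (per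
     codebook: the loop invariant SD.4 is "books below `i`"); `FinalYOK` (FY1) and `BuffersOK` (M6, M7) apart from `FloorOK` /
     `MdctOK` (established at SD.10, not SD.6 / SD.11); `TempOK` (T1) apart from `ResidueOK` (SD.12, not SD.7). Three groups read
     the content of a block that ANOTHER group owns (FY1: `values` of every floor; R7b: the class books; T1: the residue records):
     their laws are `Group.GoodGiven Q P` ("P moves, given Q of the same state").

  2. `VorbisOK G Blk mem f` (INVARIANTS §4) is the conjunction of the layer-3 groups + W1; `DeinitOK` is concrete
     (Vorbis/State/Deinit.lean); `VorbisOK.deinitOK`, `VorbisOK.moves` (THE TRANSPORT), `VorbisOK.carries`.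

  3. THE PROGRAM POINTS.  Each is a structure over the ghost `(A : G.Arena) (Blk : Block → Prop) (Live : Nat → Prop)`, the memory and
     the object address. The live set and the shadow appear ONLY in the field `env : Env Blk Live mem` (= `Covers Live mem`,
     `BlkOK Blk`, `BlkLive Blk Live`): all that a check site needs (`(h.… .site_… h.env.live …).acc h.env.covers`).
         P0 P1 P2            the shadow layer only: what layer 3 needs of it (`Covers`, IN / OUT / globals / decode_all's objects live)
         P3                  after vorbis_init + the five stream stores
         SD G k …            after section k of start_decoder, k = 1 … 12 (ONE structure; the clauses present depend on k);
                             SD4 G i …: head of iteration i of the codebook loop (SD.3 = SD4 … 0; SD.5 adds the whole loop's result)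
         SDERR               any `return error(…)` / `return FALSE` of start_decoder
         P5  FB  InFrame  P8 the arena copy: after `*f = p`; the frame boundary; between a decode-time allocation and its release;
                             after stb_vorbis_close (= FB)
     The rest of the shadow layer — SH1, SH3, StackOK with the list of active protected frames, `Sealed` — is Q0's
     `Asan.ShadowInv others frames top mem` (Asan/Stack.lean), with `Live := Asan.Live (stackObjs frames ++ others)`: a contract states
     `ShadowInv … ∧ SD G k A Blk (Live …) …`. P9 (`vorbis_exit: hlt`) is the conclusion of Vorbis/Statement.lean.
     `SDFrameConsts k mem R`: the constants gcc keeps in spill slots of start_decoder's frame (`R` = its steady rsp), part of every `SD`.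

  4. THE IMPLICATIONS between points that are pure logic are theorems here (`P3.deinitOK`, `SD.deinitOK`, `SD.err`, `SD.vorbisOK`,
     `SD4.of_SD3`, `SD4.codebooksOK`, `P5.of_move`, `P5.fb`, `FB.deinitOK`, `FB.carry`); those that need the machine (section k of
     start_decoder takes `SD k` to `SD (k+1)` or to `SDERR`) are the contracts of the segments: the composition units state them
     with these predicates.
-/
import Vorbis.State.Window
import Vorbis.State.Deinit
namespace Vorbis
open X86 X86.User Asan

/-! ### 1. The groups of clauses owned by Q2 – Q7 -/

/-- **The group predicates of Q2 – Q7, by their agreed names.** A field per group; the comment says which clauses of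
INVARIANTS.md it stands for and which file will define it. -/
structure Groups where
  /-- Q2, Vorbis/Arena.lean: ALL the ghost state of the arena layer. Q2's predicates are `ArenaOK (A : Arena) (others : List Obj) mem f`:
  plug `Arena := Vorbis.Arena × List Asan.Obj` (the ghost arena and Q0's list of live non-stack objects) -/
  Arena : Type
  /-- Q2: AR1 – AR7 for the ghost, the four fields of AR5 read at `f` -/
  ArenaOK : Arena → Mem → Nat → Prop
  /-- Q2: ArenaDecodeOK = ArenaOK ∧ `temps = []` ∧ `T = L` ∧ `tmr % 8 = 0` ∧ `S + tmr + 32 ≤ L` -/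
  ADO : Arena → Mem → Nat → Prop
  /-- Q2: inside a frame: ArenaOK ∧ `temps = [(T, n)]` ∧ `r8 n ≤ tmr` ∧ the room clause of ADO -/
  ADOBusy : Arena → Nat → Mem → Nat → Prop
  /-- Q2: `A.temps = []` (hence `T = L` under ArenaOK) -/
  NoTemps : Arena → Prop
  /-- Q2: `A.setups = [] ∧ A.temps = []` (hence `S = 0`, `T = L`): the arena right after vorbis_init -/
  Fresh : Arena → Prop
  /-- Q2: `Block A p n`: the block (absolute base `p`, exact size `n`) is one of `A.setups` -/
  HasSetup : Arena → Block → Prop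
  /-- Q4, Vorbis/Codebook/Build.lean: ZF(i) of INVARIANTS §6 as `mem f i`: every byte of the codebooks `i ≤ i″ < codebook_count` is
  still 0 (Q4's `ZF mem (f->codebooks) (f->codebook_count) i`) -/
  ZF : Mem → Nat → Nat → Prop
  /-- Q3, Vorbis/Bits.lean: `Bits f` = OB1 ∧ S1 – S3 ∧ N1 – N2 ∧ V1 -/
  Bits : Group
  /-- HD1 – HD3 -/
  HeaderOK : Group
  /-- CM1 – CM3 (CM3 for every index below `comment_list_length`) -/
  CommentOK : Group
  /-- Q4, Vorbis/Codebook.lean: CB0 alone (`codebooks = 0 ∨ (1 ≤ codebook_count ≤ 256 ∧ Block(codebooks, 2120·count))`) -/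
  CB0 : Group
  /-- Q4: `CodebookOK c` = K1 – K6 (+ K4c, K5) for ONE codebook; the third argument is the codebook's address `c = cb(i)` -/
  CodebookOK : Group
  /-- Q5, Vorbis/Floor.lean: FL1 – FL10 -/
  FloorOK : Group
  /-- Q5: FY1 (established with the channel buffers, at SD.10) -/
  FinalYOK : Group
  /-- Q6, Vorbis/ResidueMapping.lean: R1 – R8b (with R8c) -/
  ResidueOK : Group
  /-- Q6: MP1 – MP6 -/
  MappingOK : Group
  /-- Q6: MD1 – MD2 -/
  ModeOK : Group
  /-- Q7, Vorbis/Mdct.lean: M6 (channel_buffers, previous_window) ∧ M7 — established by the channel loop, SD.10 -/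
  BuffersOK : Group
  /-- Q7: M2 – M4 — established by the two init_blocksize, SD.11 -/
  MdctOK : Group
  /-- Q6: T1, `temp_memory_required = max(8·C·(P+1), 2·b1)` — established last, SD.12 -/
  TempOK : Group

/-- `cb(i)` for `i < k` are finished codebooks: CB0 in its non-NULL form, and `CodebookOK` of the first `k` books. The loop
invariant of start_decoder's codebook loop (SD.4) at `k = i`; the finished section (SD.5) at `k = codebook_count`. -/
structure CodebooksUpTo (G : Groups) (k : Nat) (Blk : Block → Prop) (mem : Mem) (f : Nat) : Prop where
  cb0 : G.CB0 Blk mem f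
  nonnull : stb_vorbis.codebooks mem f ≠ 0
  upto : (k : Int) ≤ stb_vorbis.codebook_count mem f
  ok : ∀ i, i < k → G.CodebookOK Blk mem (stb_vorbis.codebooks_at mem f i)

/-- CB0 ∧ ∀ i < codebook_count, CodebookOK cb(i): the codebook line of `VorbisOK`. -/
def CodebooksAll (G : Groups) (Blk : Block → Prop) (mem : Mem) (f : Nat) : Prop :=
  CodebooksUpTo G (stb_vorbis.codebook_count mem f).toNat Blk mem f

/-- CB0 in its non-NULL form: what R7b of `ResidueOK` is read against (the class books lie in the codebooks block). -/
def CB0nn (G : Groups) : Group := fun Blk mem f => G.CB0 Blk mem f ∧ stb_vorbis.codebooks mem f ≠ 0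

/-- **What this file needs to know about the groups.** To be proved once, from the owners' lemmas, when the real definitions
are plugged in. -/
structure Groups.Laws (G : Groups) : Prop where
  /-- `Bits f` contains OB1 -/
  bits_ob1 : ∀ {Blk mem f}, G.Bits Blk mem f → OB1 Blk f
  /-- AR1 + AR5: `alloc_buffer = B ≠ 0` -/
  arena_buffer : ∀ {A mem f}, G.ArenaOK A mem f → stb_vorbis.alloc.alloc_buffer mem f ≠ 0
  /-- ADO contains ArenaOK and `temps = []` -/
  ado_arena : ∀ {A mem f}, G.ADO A mem f → G.ArenaOK A mem f ∧ G.NoTemps A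
  /-- HD3 gives the arithmetic facts the window lemmas use -/
  header_hd3v : ∀ {Blk mem f}, G.HeaderOK Blk mem f → HD3v (stb_vorbis.blocksize_0 mem f) (stb_vorbis.blocksize_1 mem f)
  /-- CM2 is H1 -/
  comment_h1 : ∀ {Blk mem f}, G.CommentOK Blk mem f → H1 Blk mem f
  /-- CB0 is H4 -/
  cb0_h4 : ∀ {Blk mem f}, G.CB0 Blk mem f → H4 Blk mem f
  /-- R2 is H2's second disjunct -/
  residue_h2 : ∀ {Blk mem f}, G.ResidueOK Blk mem f → H2 Blk mem f
  /-- R7 + R8a + "codebooks ≠ NULL" give R9 = H3 -/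
  residue_h3 : ∀ {Blk mem f}, G.ResidueOK Blk mem f → stb_vorbis.codebooks mem f ≠ 0 → H3 Blk mem f
  /-- MP1 is H5's second disjunct -/
  mapping_h5 : ∀ {Blk mem f}, G.MappingOK Blk mem f → H5 Blk mem f
  /-- the arena layer reads only `*f` (AR5) and the ghost: it follows the byte copy (Q2's `ArenaOK.move`) -/
  arena_moves : ∀ {A mem mem' p f}, Copied mem p mem' f Off.sizeof.stb_vorbis → G.ArenaOK A mem p → G.ArenaOK A mem' f
  /-- ADO reads `temp_memory_required` besides -/
  ado_moves : ∀ {A mem mem' p f}, Copied mem p mem' f Off.sizeof.stb_vorbis → G.ADO A mem p → G.ADO A mem' f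
  bits : G.Bits.Good
  header : G.HeaderOK.Good
  comment : G.CommentOK.Good
  cb0 : G.CB0.Good
  /-- one codebook does not move; it survives a change outside the allocated blocks -/
  codebook : G.CodebookOK.Stable Off.sizeof.Codebook
  floor : G.FloorOK.Good
  /-- FY1 reads `values` of every floor and the 16-entry pointer array `finalY[]`: it moves given FL1 / FL2 and HD1 -/
  finalY : Group.GoodGiven (fun Blk mem f => G.HeaderOK Blk mem f ∧ G.FloorOK Blk mem f) G.FinalYOK
  /-- R7b / R8a read `dimensions` / `entries` of the class books: it moves given the codebooks block -/
  residue : Group.GoodGiven (CB0nn G) G.ResidueOK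
  mapping : G.MappingOK.Good
  mode : G.ModeOK.Good
  /-- M6 reads the 16-entry pointer arrays `channel_buffers[]`, `previous_window[]`: it moves given HD1 -/
  buffers : Group.GoodGiven G.HeaderOK G.BuffersOK
  mdct : G.MdctOK.Good
  /-- T1 reads `begin`, `end`, `part_size` of every residue record: it moves given R1 / R2 -/
  temp : Group.GoodGiven G.ResidueOK G.TempOK

/-! ### 2. `VorbisOK` -/

/-- **`VorbisOK f`** (INVARIANTS §4): the decoder invariant, layer 3, over the block predicate `Blk`. Read-only after start_decoder
returned 1, except S3, N1 – N2, V1 (in `bits`), M7 (in `buffers`), W1, and the contents of the sample buffers. The arena layer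
(`ArenaOK` / `ADO`) and the shadow layer are separate conjuncts of a program point. -/
structure VorbisOK (G : Groups) (Blk : Block → Prop) (mem : Mem) (f : Nat) : Prop where
  /-- OB1 ∧ S1 – S3 ∧ N1 – N2 ∧ V1 -/
  bits : G.Bits Blk mem f
  /-- HD1 – HD3 -/
  header : G.HeaderOK Blk mem f
  /-- CM1 – CM3 -/
  comment : G.CommentOK Blk mem f
  /-- CB0 ∧ ∀ i < codebook_count, CodebookOK cb(i) -/
  codebooks : CodebooksAll G Blk mem f
  /-- FL1 – FL10 -/
  floor : G.FloorOK Blk mem f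
  /-- FY1 -/
  finalY : G.FinalYOK Blk mem f
  /-- R1 – R8b -/
  residue : G.ResidueOK Blk mem f
  /-- MP1 – MP6 -/
  mapping : G.MappingOK Blk mem f
  /-- MD1 – MD2 -/
  mode : G.ModeOK Blk mem f
  /-- M6 – M7 -/
  buffers : G.BuffersOK Blk mem f
  /-- M2 – M4 -/
  mdct : G.MdctOK Blk mem f
  /-- T1 -/
  temp : G.TempOK Blk mem f
  /-- W1 -/
  w1 : W1 mem f

namespace VorbisOK
variable {G : Groups} {Blk Blk' : Block → Prop} {mem mem' : Mem} {f p : Nat}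

/-- OB1 of the object. -/
theorem ob1 (hL : G.Laws) (h : VorbisOK G Blk mem f) : OB1 Blk f := hL.bits_ob1 h.bits

/-- The block sizes, as arithmetic. -/
theorem hd3v (hL : G.Laws) (h : VorbisOK G Blk mem f) :
    HD3v (stb_vorbis.blocksize_0 mem f) (stb_vorbis.blocksize_1 mem f) := hL.header_hd3v h.header

/-- CB0 in its non-NULL form. -/
theorem cb0nn (h : VorbisOK G Blk mem f) : CB0nn G Blk mem f := ⟨h.codebooks.cb0, h.codebooks.nonnull⟩

/-- **`VorbisOK ⇒ DeinitOK`** (stb_vorbis_close on the success path), given `alloc_buffer ≠ 0` from the arena layer. -/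
theorem deinitOK (hL : G.Laws) (h : VorbisOK G Blk mem f) (hbuf : stb_vorbis.alloc.alloc_buffer mem f ≠ 0) :
    DeinitOK Blk mem f :=
  ⟨h.ob1 hL, hbuf, hL.comment_h1 h.comment, hL.residue_h2 h.residue, hL.residue_h3 h.residue h.codebooks.nonnull,
    hL.cb0_h4 h.codebooks.cb0, hL.mapping_h5 h.mapping⟩

end VorbisOK

/-- The codebook `i < codebook_count` lies inside the codebooks block, which is allocated (CB0 = H4, non-NULL). -/
theorem CodebooksUpTo.book_in {G : Groups} (hL : G.Laws) {k : Nat} {Blk : Block → Prop} {mem : Mem} {f : Nat}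
    (h : CodebooksUpTo G k Blk mem f) {i : Nat} (hi : (i : Int) < stb_vorbis.codebook_count mem f) :
    ∃ B, Blk B ∧ B.contains (stb_vorbis.codebooks_at mem f i) Off.sizeof.Codebook := by
  cases hL.cb0_h4 h.cb0 with
  | inl hz => exact absurd hz h.nonnull
  | inr hb =>
    refine ⟨_, hb.2, ?_⟩
    simp only [vblock, vacc, voff] at hi ⊢
    omega

/-- The first `k` codebooks follow the object: CB0 moves, the two fields `codebooks` / `codebook_count` are copied, and each
finished codebook stays where it is, inside the `codebooks` block, which is allocated and kept. -/
theorem CodebooksUpTo.move {G : Groups} (hL : G.Laws) {k : Nat} {Blk Blk' : Block → Prop} {mem mem' : Mem} {p f : Nat}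
    (hm : Move Blk Blk' mem mem' p f) (h : CodebooksUpTo G k Blk mem p) : CodebooksUpTo G k Blk' mem' f := by
  have hc := hm.copied
  simp only [voff] at hc
  have ecbs : stb_vorbis.codebooks mem' f = stb_vorbis.codebooks mem p := by
    simp only [vacc, voff]
    exact hc.u64 168 (by omega)
  have ecnt : stb_vorbis.codebook_count mem' f = stb_vorbis.codebook_count mem p := by
    simp only [vacc, voff]
    exact hc.i32 160 (by omega)
  refine ⟨hL.cb0.moves _ _ _ _ _ _ hm h.cb0, ?_, ?_, ?_⟩
  · rw [ecbs]
    exact h.nonnull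
  · rw [ecnt]
    exact h.upto
  · intro i hi
    have e : stb_vorbis.codebooks_at mem' f i = stb_vorbis.codebooks_at mem p i := by
      simp only [vacc, voff] at ecbs ⊢
      rw [ecbs]
    rw [e]
    have hlt : (i : Int) < stb_vorbis.codebook_count mem p := by
      have := h.upto
      omega
    exact hL.codebook Blk Blk' mem mem' _ hm.allKept hm.sub (h.book_in hL hlt) (h.ok i hi)

/-- The same for the coarse frame. -/
theorem CodebooksUpTo.carry {G : Groups} (hL : G.Laws) {k : Nat} {Blk Blk' : Block → Prop} {mem mem' : Mem} {f : Nat}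
    (ha : AllKept Blk mem mem') (hB : ∀ B, Blk B → Blk' B) (hob : Blk (objBlock f)) (h : CodebooksUpTo G k Blk mem f) :
    CodebooksUpTo G k Blk' mem' f := by
  have hk := ha _ hob
  have he : ObjEq [(160, 176)] mem f mem' f := ObjEq.of_same hk.same hk.inside (by decide)
  have ecbs : stb_vorbis.codebooks mem' f = stb_vorbis.codebooks mem f := by
    simp only [vacc, voff]
    exact he.u64 168 (by decide)
  have ecnt : stb_vorbis.codebook_count mem' f = stb_vorbis.codebook_count mem f := by
    simp only [vacc, voff]
    exact he.i32 160 (by decide)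
  refine ⟨hL.cb0.carries _ _ _ _ _ ha hB hob h.cb0, ?_, ?_, ?_⟩
  · rw [ecbs]
    exact h.nonnull
  · rw [ecnt]
    exact h.upto
  · intro i hi
    have e : stb_vorbis.codebooks_at mem' f i = stb_vorbis.codebooks_at mem f i := by
      simp only [vacc, voff] at ecbs ⊢
      rw [ecbs]
    rw [e]
    have hlt : (i : Int) < stb_vorbis.codebook_count mem f := by
      have := h.upto
      omega
    exact hL.codebook Blk Blk' mem mem' _ ha hB (h.book_in hL hlt) (h.ok i hi)

/-- **THE TRANSPORT LEMMA FOR `*f = p`**: `VorbisOK` of the stack object `p` before the copy is `VorbisOK` of the arena copy `f`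
after it. (stb_vorbis_open_memory, after `memcpy(f, &p, 1808)` returned; `Move` bundles what is known there.) -/
theorem VorbisOK.moves {G : Groups} (hL : G.Laws) : Group.Moves (VorbisOK G) := by
  intro Blk Blk' mem mem' p f hm h
  have ecnt : stb_vorbis.codebook_count mem' f = stb_vorbis.codebook_count mem p := by
    have hc := hm.copied
    simp only [voff] at hc
    simp only [vacc, voff]
    exact hc.i32 160 (by omega)
  constructor
  · exact hL.bits.moves _ _ _ _ _ _ hm h.bits
  · exact hL.header.moves _ _ _ _ _ _ hm h.header
  · exact hL.comment.moves _ _ _ _ _ _ hm h.comment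
  · unfold CodebooksAll
    rw [ecnt]
    exact h.codebooks.move hL hm
  · exact hL.floor.moves _ _ _ _ _ _ hm h.floor
  · exact hL.finalY.moves _ _ _ _ _ _ hm ⟨h.header, h.floor⟩ h.finalY
  · exact hL.residue.moves _ _ _ _ _ _ hm h.cb0nn h.residue
  · exact hL.mapping.moves _ _ _ _ _ _ hm h.mapping
  · exact hL.mode.moves _ _ _ _ _ _ hm h.mode
  · exact hL.buffers.moves _ _ _ _ _ _ hm h.header h.buffers
  · exact hL.mdct.moves _ _ _ _ _ _ hm h.mdct
  · exact hL.temp.moves _ _ _ _ _ _ hm h.residue h.temp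
  · exact W1.moves _ _ _ _ _ _ hm h.w1

/-- **The coarse FRAME of `VorbisOK`**: the memory changed outside the allocated blocks only (and blocks may have been added). -/
theorem VorbisOK.carries {G : Groups} (hL : G.Laws) : Group.Carries (VorbisOK G) := by
  intro Blk Blk' mem mem' f ha hB hob h
  have hk := ha _ hob
  have ecnt : stb_vorbis.codebook_count mem' f = stb_vorbis.codebook_count mem f := by
    have he : ObjEq [(160, 176)] mem f mem' f := ObjEq.of_same hk.same hk.inside (by decide)
    simp only [vacc, voff]
    exact he.i32 160 (by decide)
  constructor
  · exact hL.bits.carries _ _ _ _ _ ha hB hob h.bits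
  · exact hL.header.carries _ _ _ _ _ ha hB hob h.header
  · exact hL.comment.carries _ _ _ _ _ ha hB hob h.comment
  · unfold CodebooksAll
    rw [ecnt]
    exact h.codebooks.carry hL ha hB hob
  · exact hL.floor.carries _ _ _ _ _ ha hB hob h.floor
  · exact hL.finalY.carries _ _ _ _ _ ha hB hob ⟨h.header, h.floor⟩ h.finalY
  · exact hL.residue.carries _ _ _ _ _ ha hB hob h.cb0nn h.residue
  · exact hL.mapping.carries _ _ _ _ _ ha hB hob h.mapping
  · exact hL.mode.carries _ _ _ _ _ ha hB hob h.mode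
  · exact hL.buffers.carries _ _ _ _ _ ha hB hob h.header h.buffers
  · exact hL.mdct.carries _ _ _ _ _ ha hB hob h.mdct
  · exact hL.temp.carries _ _ _ _ _ ha hB hob h.residue h.temp
  · exact h.w1.carries hob ha

/-! ### 3. Small concrete clauses the points mention -/

/-- `tmr` = `temp_memory_required`, the value T1 computes. -/
def tmr (mem : Mem) (f : Nat) : Nat := stb_vorbis.temp_memory_required mem f

/-- **The final test of start_decoder with ARENA-FIX 1** (line 4216, negated): `S + 1808 + tmr + 64 ≤ T`, and `T = L`. With it
`vorbis_alloc` succeeds and ADO holds after it (`L − (S + 1840) ≥ tmr + 32`). -/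
structure FinalTest (mem : Mem) (f : Nat) : Prop where
  fits : stb_vorbis.setup_offset mem f + 1808 + (tmr mem f : Int) + 64 ≤ stb_vorbis.temp_offset mem f
  top : stb_vorbis.temp_offset mem f = stb_vorbis.alloc.alloc_buffer_length_in_bytes mem f

/-- **The slot of `longest_floorlist`** (`dword [R + 28H]` of start_decoder's frame, from the floor section to its last read in
the channel loop): at least every floor's `values`; FY1's block size `2·longest_floorlist` rests on it. -/
structure LongestFloorlist (mem : Mem) (f R : Nat) : Prop where
  lo : 2 ≤ mem.i32 (R + 0x28)
  hi : mem.i32 (R + 0x28) ≤ 250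
  ge : ∀ i : Nat, (i : Int) < stb_vorbis.floor_count mem f →
    Floor1.values mem (stb_vorbis.floor_config_at mem f i) ≤ mem.i32 (R + 0x28)

/-- **The constants gcc keeps in spill slots of start_decoder** (CONTRACTS.md, notes of start_decoder; DECISIONS §3), `R` = the
steady rsp (entry rsp − 1480), at the cut point after section `k`. Far-away code depends on them:
`ONE20` dword `[R+20H] = 1` — the value `return TRUE` loads (valid from section 1 to the end);
`Z10` byte `[R+10H] = 0` — read as the `0` of `c->sparse = ordered ? 0 : …` (K2 depends on it), valid until the mapping loop
reuses the slot (after SD.7);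
`Z24` dword `[R+24H] = 0` — 35 reads as the literal 0, valid from the end of the comment section (SD.2) until the estimate
loop reuses the slot (after SD.11);
qword `[R+8] = (R+50H) >> 3` — the shadow index of the protected frame, read only by the common epilogue. -/
structure SDFrameConsts (k : Nat) (mem : Mem) (R : Nat) : Prop where
  aligned : R % 8 = 0
  shadowIdx : mem.u64 (R + 8) = (R + 0x50) / 8
  one20 : mem.u32 (R + 0x20) = 1
  z10 : k ≤ 7 → mem.u8 (R + 0x10) = 0
  z24 : 2 ≤ k → k ≤ 11 → mem.u32 (R + 0x24) = 0

/-- **FRAME** of the constants: the slots `[R + 8, R + 28H)` read the same. (They lie below the protected frame, in no live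
object: a checked store never hits them; only start_decoder's own spills could.) -/
theorem SDFrameConsts.frame {k : Nat} {mem mem' : Mem} {R : Nat} (h : SDFrameConsts k mem R)
    (he : Mem.EqOn (R + 8) (R + 0x28) mem mem') (hR : R + 0x28 ≤ 2 ^ 64) : SDFrameConsts k mem' R := by
  obtain ⟨h1, h2, h3, h4, h5⟩ := h
  refine ⟨h1, ?_, ?_, ?_, ?_⟩
  · rw [he.u64 (R + 8) (by omega) (by omega) hR]
    exact h2
  · rw [he.u32 (R + 0x20) (by omega) (by omega) hR]
    exact h3
  · intro hk
    rw [he.u8 (R + 0x10) (by omega) (by omega) hR]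
    exact h4 hk
  · intro hk1 hk2
    rw [he.u32 (R + 0x24) (by omega) (by omega) hR]
    exact h5 hk1 hk2

/-- Going on to the next cut point keeps the constants that are still valid there. -/
theorem SDFrameConsts.next {k k' : Nat} {mem : Mem} {R : Nat} (h : SDFrameConsts k mem R) (hk : k ≤ k') (h2 : 2 ≤ k) :
    SDFrameConsts k' mem R :=
  ⟨h.aligned, h.shadowIdx, h.one20, fun h7 => h.z10 (by omega), fun _ h11 => h.z24 h2 (by omega)⟩

/-- The first byte of `*f` that no section up to `k` has assigned (offsets of `codebook_count`, `floor_count`, `residue_count`,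
`mapping_count`, `mode_count`, `total_samples`, `A`, `serial`): from there to the paging fields `*f` is still zero. -/
def restFrom (k : Nat) : Nat :=
  if k ≤ 2 then Off.stb_vorbis.codebook_count
  else if k ≤ 5 then Off.stb_vorbis.floor_count
  else if k = 6 then Off.stb_vorbis.residue_count
  else if k = 7 then Off.stb_vorbis.mapping_count
  else if k = 8 then Off.stb_vorbis.mode_count
  else if k = 9 then Off.stb_vorbis.total_samples
  else if k = 10 then Off.stb_vorbis.A
  else Off.stb_vorbis.serial

/-! ### 4. The program points -/

/-- **The environment of a check site**: the shadow covers the live set, the block predicate is lawful, every allocated block is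
live. The ONLY place where a program point mentions the live set. A USE lemma is applied as
`(h.vorbis.….site_… h.env.live … ha).acc h.env.covers`. -/
structure Env (Blk : Block → Prop) (Live : Nat → Prop) (mem : Mem) : Prop where
  covers : Covers Live mem
  ok : BlkOK Blk
  live : BlkLive Blk Live

/-- The environment survives a change of memory that leaves the shadow alone. -/
theorem Env.eqOn {Blk : Block → Prop} {Live : Nat → Prop} {mem mem' : Mem} (h : Env Blk Live mem)
    (hsh : Mem.EqOn 0xC00000 0xE00000 mem mem') : Env Blk Live mem' :=
  ⟨h.covers.eqOn hsh, h.ok, h.live⟩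

/-- The output buffer (SH6): always the full 300000H bytes. -/
def blockOUT : Block := ⟨0x400000, 0x300000⟩

/-- The six registered globals (SH5): vorbis.0, range_list, log2_4, inverse_db_table, ogg_page_header, crc_table. -/
def globalBlocks : List Block :=
  [⟨0x121600, 6⟩, ⟨0x120600, 16⟩, ⟨0x120640, 16⟩, ⟨0x120680, 1024⟩, ⟨0x120ac0, 4⟩, ⟨0x121c00, 1024⟩]

/-- **P0, the start machine**, as far as layers 2 and 3 are concerned: the shadow covers the live set, IN and OUT are live.
(SH1, SH7, the clean stack, the poisoned arena: `Asan.ShadowInv (initialObjs len) [] 800000H mem`, Q0's `start_shadowInv`.) -/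
structure P0 (Live : Nat → Prop) (mem : Mem) (len : Nat) : Prop where
  covers : Covers Live mem
  len_le : len ≤ 0x1FF000
  /-- SH6 / S2: the input, `inBlock len` of Vorbis/Bits.lean -/
  inp : (inBlock len).live Live
  out : blockOUT.live Live

/-- **P1, after `call run_ctors`**: + SH5, the globals are live objects. -/
structure P1 (Live : Nat → Prop) (mem : Mem) (len : Nat) : Prop extends P0 Live mem len where
  globals : ∀ B, B ∈ globalBlocks → B.live Live

/-- **P2, decode_all after its prologue**: + its four frame objects `error ch chan a` at `D + 32, 48, 64, 96` (`D` = the base of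
its protected frame). -/
structure P2 (Live : Nat → Prop) (mem : Mem) (len D : Nat) : Prop extends P1 Live mem len where
  error : (Block.mk (D + 32) 4).live Live
  ch : (Block.mk (D + 48) 4).live Live
  chan : (Block.mk (D + 64) 8).live Live
  a : (Block.mk (D + 96) 16).live Live

/-- **P3, stb_vorbis_open_memory after `vorbis_init(&p, alloc)` and the five stream stores**: OB1(&p), H0 (up to the stream
fields), the arena fresh (AR1 – AR7 with S = 0, T = L, lists empty), `Bits` with `stream = stream_start`. This is the
precondition of start_decoder. `f = &p` = the base of open_memory's protected frame + 48. (NO, `stream ≤ stream_end`, is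
part of `Bits` in the frozen source: FIX 20.) -/
structure P3 (G : Groups) (A : G.Arena) (Blk : Block → Prop) (Live : Nat → Prop) (mem : Mem) (f : Nat) : Prop where
  env : Env Blk Live mem
  h0 : H0s mem f
  arena : G.ArenaOK A mem f
  fresh : G.Fresh A
  bits : G.Bits Blk mem f
  start : stb_vorbis.stream mem f = stb_vorbis.stream_start mem f

/-- **SD.k, k = 1 … 12: after section `k` of start_decoder** (INVARIANTS §5). ONE structure: a clause guarded by `n ≤ k` holds
from point `n` on; one guarded by `k ≤ n` holds up to point `n`.
  1 identification header · 2 comment header · 3 `memset(f->codebooks…)` · (4: `SD4`, the codebook loop) · 5 time-domain loop ·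
  6 floor loop · 7 residue loop · 8 mapping loop · 9 mode loop + flush_packet · 10 channel loop · 11 the two init_blocksize +
  `blocksize[]` · 12 `return TRUE`.
`f = &p` of stb_vorbis_open_memory's frame; `R` = start_decoder's steady rsp. ArenaOK ∧ `temps = []` (hence `T = L`) at every point.
`setups`: every setup block of the arena ghost is an allocated block (so a block `setup_malloc` just returned can be put into a
SHAPE clause). -/
structure SD (G : Groups) (k : Nat) (A : G.Arena) (Blk : Block → Prop) (Live : Nat → Prop) (mem : Mem) (f R : Nat) :
    Prop where
  env : Env Blk Live mem
  frame : SDFrameConsts k mem R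
  arena : G.ArenaOK A mem f
  setups : ∀ B, G.HasSetup A B → Blk B
  noTemps : G.NoTemps A
  /-- `Bits f` (S3 is `stream_start ≤ stream ≤ stream_end` at every point in the frozen source, FIX 20: no weak form) -/
  bits : G.Bits Blk mem f
  /-- set by line 3614, cleared by the first decoded frame -/
  first : stb_vorbis.first_decode mem f = 1
  /-- never written by start_decoder: still vorbis_init's 0 (W1 once HD3 is there: `SD.w1`) -/
  discard0 : stb_vorbis.discard_samples_deferred mem f = 0
  header : 1 ≤ k → G.HeaderOK Blk mem f
  /-- `vendor`, `comment_list_length`, `comment_list` are still 0 before the comment section has run -/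
  commentZero : k ≤ 1 → ZeroRange mem f Off.stb_vorbis.vendor Off.stb_vorbis.stream
  comment : 2 ≤ k → G.CommentOK Blk mem f
  cb0 : 3 ≤ k → G.CB0 Blk mem f ∧ stb_vorbis.codebooks mem f ≠ 0
  codebooks : 5 ≤ k → CodebooksAll G Blk mem f
  floor : 6 ≤ k → G.FloorOK Blk mem f
  lfl : 6 ≤ k → k ≤ 9 → LongestFloorlist mem f R
  residue : 7 ≤ k → G.ResidueOK Blk mem f
  mapping : 8 ≤ k → G.MappingOK Blk mem f
  mode : 9 ≤ k → G.ModeOK Blk mem f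
  buffers : 10 ≤ k → G.BuffersOK Blk mem f ∧ G.FinalYOK Blk mem f
  mdct : 11 ≤ k → G.MdctOK Blk mem f
  temp : 12 ≤ k → G.TempOK Blk mem f ∧ FinalTest mem f
  /-- `H0rest`: what the sections not yet run will assign is still zero -/
  rest : RestZero mem f (restFrom k)

/-- **SD.4: the head of iteration `i` of the codebook loop** (line 3746), and the state after the loop at `i = codebook_count`:
SD.3's clauses, the books below `i` finished, the books from `i` on still all-zero. SD.3 itself is `SD4 … 0`. `temps = []` at
every head: each iteration releases its temp blocks. -/
structure SD4 (G : Groups) (i : Nat) (A : G.Arena) (Blk : Block → Prop) (Live : Nat → Prop) (mem : Mem) (f R : Nat) : Prop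
    extends SD G 3 A Blk Live mem f R where
  done : CodebooksUpTo G i Blk mem f
  zf : G.ZF mem f i

/-- **SD.ERR: any `return error(f, …)` / `return FALSE` of start_decoder** (all through its single epilogue; eax = 0):
DeinitOK(&p), `Bits f`, the shadow layer. NOT promised: AR2 – AR4 (temp blocks may be left allocated, T may point into one),
HD1, and K / FL / R / MP / MD of the record being parsed. Nothing allocates and nothing reads arena data afterwards:
stb_vorbis_open_memory stores `*error`, calls `vorbis_deinit(&p)` — which needs exactly `deinit` — and returns NULL. -/
structure SDERR (G : Groups) (Blk : Block → Prop) (Live : Nat → Prop) (mem : Mem) (f : Nat) : Prop where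
  env : Env Blk Live mem
  deinit : DeinitOK Blk mem f
  bits : G.Bits Blk mem f

/-- **P5, stb_vorbis_open_memory after `f' = vorbis_alloc(&p)` and `*f' = p`**: full `VorbisOK f'` for the ARENA copy, ADO
(`L − S' ≥ tmr + 32`), and the copy is a setup block. The precondition of vorbis_pump_first_frame. -/
structure P5 (G : Groups) (A : G.Arena) (Blk : Block → Prop) (Live : Nat → Prop) (mem : Mem) (f : Nat) : Prop where
  env : Env Blk Live mem
  vorbis : VorbisOK G Blk mem f
  ado : G.ADO A mem f
  self : G.HasSetup A (objBlock f)
  first : stb_vorbis.first_decode mem f = 1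

/-- **FB, the frame boundary**: after vorbis_pump_first_frame; the head of decode_all's loop; before and after every
stb_vorbis_get_frame_float (also after one that returned 0: a failing packet changes only stream / paging / bit fields and
contents of sample buffers). `stored`, `room` are decode_all's counters. P8 (after stb_vorbis_close) is FB too: vorbis_deinit
stores nothing and frees nothing. -/
structure FB (G : Groups) (A : G.Arena) (Blk : Block → Prop) (Live : Nat → Prop) (mem : Mem) (f : Nat)
    (stored room : Int) : Prop where
  env : Env Blk Live mem
  vorbis : VorbisOK G Blk mem f
  ado : G.ADO A mem f
  stored_nonneg : 0 ≤ stored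
  stored_le : stored ≤ room

/-- P8 is FB. -/
abbrev P8 := FB

/-- **Inside a frame**: between decode_residue's allocation and its `done:`, between inverse_mdct's allocation and its restore.
ADO weakened to Q2's `ADOBusy`: ArenaOK with exactly one temp block of `sz` bytes, `r8 sz ≤ tmr` (T3); everything else as FB. -/
structure InFrame (G : Groups) (A : G.Arena) (Blk : Block → Prop) (Live : Nat → Prop) (mem : Mem) (f sz : Nat) : Prop where
  env : Env Blk Live mem
  vorbis : VorbisOK G Blk mem f
  busy : G.ADOBusy A sz mem f

/-! ### 5. Implications between the points -/

section Implications
variable {G : Groups} {A : G.Arena} {Blk Blk' : Block → Prop} {Live Live' : Nat → Prop} {mem mem' : Mem} {f p R k : Nat}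

/-- P3 gives DeinitOK (H0 is the base case of H1 – H5): a failure before anything was parsed. -/
theorem P3.deinitOK (hL : G.Laws) (h : P3 G A Blk Live mem f) : DeinitOK Blk mem f :=
  h.h0.deinitOK (hL.bits_ob1 h.bits) (hL.arena_buffer h.arena)

/-- The rest is zero from `residue_count` on before the residue section has run. -/
theorem restFrom_le_residue (hk : k ≤ 6) : restFrom k ≤ Off.stb_vorbis.residue_count := by
  unfold restFrom
  simp only [voff]
  split
  · omega
  · split
    · omega
    · split
      · omega
      · omega

/-- The rest is zero from `mapping_count` on before the mapping section has run. -/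
theorem restFrom_le_mapping (hk : k ≤ 7) : restFrom k ≤ Off.stb_vorbis.mapping_count := by
  unfold restFrom
  simp only [voff]
  split
  · omega
  · split
    · omega
    · split
      · omega
      · split
        · omega
        · omega

/-- The rest is zero from `codebook_count` on before the codebook section has run. -/
theorem restFrom_le_codebook (hk : k ≤ 2) : restFrom k ≤ Off.stb_vorbis.codebook_count := by
  unfold restFrom
  simp only [voff]
  split
  · omega
  · omega

/-- **`DeinitOK(&p)` at every cut point of start_decoder**: each of H1 – H5 comes from the group, if its section has run, or from
the zero rest, if not. This is why an error return ANYWHERE between two sections satisfies SD.ERR as soon as the section's own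
partial state does (the segments' assertions `GLB(i)`, `RES(i)` …). -/
theorem SD.deinitOK (hL : G.Laws) (h : SD G k A Blk Live mem f R) : DeinitOK Blk mem f := by
  refine ⟨hL.bits_ob1 h.bits, hL.arena_buffer h.arena, ?_, ?_, ?_, ?_, ?_⟩
  · -- H1
    by_cases hk : 2 ≤ k
    · exact hL.comment_h1 (h.comment hk)
    · have hz := h.commentZero (by omega)
      simp only [voff] at hz
      apply H1.of_zero
      simp only [vacc, voff]
      exact hz.i32 32 (by omega) (by omega)
  · -- H2
    by_cases hk : 7 ≤ k
    · exact hL.residue_h2 (h.residue hk)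
    · exact H2.of_null (h.rest.residue_null (restFrom_le_residue (by omega))).1
  · -- H3
    by_cases hk : 7 ≤ k
    · exact hL.residue_h3 (h.residue hk) (h.cb0 (by omega)).2
    · exact H3.of_null (h.rest.residue_null (restFrom_le_residue (by omega))).1
  · -- H4
    by_cases hk : 3 ≤ k
    · exact hL.cb0_h4 (h.cb0 hk).1
    · exact H4.of_null (h.rest.codebooks_null (restFrom_le_codebook (by omega)))
  · -- H5
    by_cases hk : 8 ≤ k
    · exact hL.mapping_h5 (h.mapping hk)
    · exact H5.of_null (h.rest.mapping_null (restFrom_le_mapping (by omega)))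

/-- **Every cut point of start_decoder satisfies SD.ERR** (an error stub reached from a cut point: `error()` stores `f.error`
only). -/
theorem SD.err (hL : G.Laws) (h : SD G k A Blk Live mem f R) : SDERR G Blk Live mem f :=
  ⟨h.env, h.deinitOK hL, h.bits⟩

/-- P3 satisfies SD.ERR too (start_decoder's first error returns). -/
theorem P3.err (hL : G.Laws) (h : P3 G A Blk Live mem f) : SDERR G Blk Live mem f :=
  ⟨h.env, h.deinitOK hL, h.bits⟩

/-- W1 at a cut point, once HD3 is there. -/
theorem SD.w1 (hL : G.Laws) (h : SD G k A Blk Live mem f R) (hk : 1 ≤ k) : W1 mem f :=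
  W1.of_zero h.discard0 (hL.header_hd3v (h.header hk)).le

/-- **SD.12 is full `VorbisOK(&p)`** (+ ArenaOK, `temps = []`, the final test: the fields `arena`, `noTemps`, `temp`). -/
theorem SD.vorbisOK (hL : G.Laws) (h : SD G 12 A Blk Live mem f R) : VorbisOK G Blk mem f :=
  ⟨h.bits, h.header (by omega), h.comment (by omega), h.codebooks (by omega), h.floor (by omega),
    (h.buffers (by omega)).2, h.residue (by omega), h.mapping (by omega), h.mode (by omega), (h.buffers (by omega)).1,
    h.mdct (by omega), (h.temp (by omega)).1, h.w1 hL (by omega)⟩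

/-- SD.3 is the codebook loop's invariant at `i = 0`, given that the fresh block is all zero (the memset's post). -/
theorem SD4.of_SD3 (h : SD G 3 A Blk Live mem f R) (hcnt : 0 ≤ stb_vorbis.codebook_count mem f) (hz : G.ZF mem f 0) :
    SD4 G 0 A Blk Live mem f R :=
  { toSD := h
    done := ⟨(h.cb0 (by omega)).1, (h.cb0 (by omega)).2, by omega, fun i hi => absurd hi (Nat.not_lt_zero i)⟩
    zf := hz }

/-- The loop's exit (`i = codebook_count`) is SD.3 + the finished codebooks; SD.5 follows with the time-domain loop's frame. -/
theorem SD4.codebooksOK {i : Nat} (h : SD4 G i A Blk Live mem f R) (hi : (i : Int) = stb_vorbis.codebook_count mem f) :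
    CodebooksAll G Blk mem f := by
  unfold CodebooksAll
  have e : (stb_vorbis.codebook_count mem f).toNat = i := by omega
  rw [e]
  exact h.done

/-- One more codebook: the step of the loop invariant, on the invariant side (the memory is the one after the iteration; the
books below `i` and CB0 were carried by the owners' frame lemmas). -/
theorem CodebooksUpTo.succ {i : Nat} (h : CodebooksUpTo G i Blk mem f) (hi : (i : Int) < stb_vorbis.codebook_count mem f)
    (hnew : G.CodebookOK Blk mem (stb_vorbis.codebooks_at mem f i)) : CodebooksUpTo G (i + 1) Blk mem f := by
  refine ⟨h.cb0, h.nonnull, by omega, ?_⟩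
  intro j hj
  by_cases e : j = i
  · rw [e]
    exact hnew
  · exact h.ok j (by omega)

/-- **SD.12 → P5: the composition of stb_vorbis_open_memory around `vorbis_alloc` and `memcpy`.**
`h`: `VorbisOK(&p)` over the block predicate BEFORE the allocation, in the memory after `vorbis_alloc` (the owners' frame lemmas
carried it over the store to `p.setup_offset`: `ObjSame`). `hado`: ADO for the new ghost, about `p` (setup_malloc's
post + `FinalTest`). `hm`: the copy. `henv`: the environment of the NEW block predicate in the memory before the copy (the
allocator's post). Then the arena copy `f` satisfies P5. -/
theorem P5.of_move (hL : G.Laws) {A' : G.Arena} (hm : Move Blk Blk' mem mem' p f) (henv : Env Blk' Live' mem)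
    (h : VorbisOK G Blk mem p) (hado : G.ADO A' mem p) (hself : G.HasSetup A' (objBlock f))
    (hfirst : stb_vorbis.first_decode mem p = 1) : P5 G A' Blk' Live' mem' f := by
  refine ⟨henv.eqOn hm.shadow, VorbisOK.moves hL _ _ _ _ _ _ hm h, ?_, hself, ?_⟩
  · exact hL.ado_moves hm.copied hado
  · have hcp := hm.copied
    simp only [voff] at hcp
    simp only [vacc, voff] at hfirst ⊢
    rw [hcp.u8 1749 (by omega)]
    exact hfirst

/-- P5 is a frame boundary (vorbis_pump_first_frame's precondition is FB + `first_decode = 1`). -/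
theorem P5.fb (h : P5 G A Blk Live mem f) : FB G A Blk Live mem f 0 0 :=
  ⟨h.env, h.vorbis, h.ado, Int.le_refl 0, Int.le_refl 0⟩

/-- **FB gives DeinitOK**: stb_vorbis_close on the success path. -/
theorem FB.deinitOK (hL : G.Laws) {stored room : Int} (h : FB G A Blk Live mem f stored room) : DeinitOK Blk mem f :=
  h.vorbis.deinitOK hL (hL.arena_buffer (hL.ado_arena h.ado).1)

/-- **The coarse FRAME of FB**: the memory changed outside the allocated blocks, the shadow is untouched (a callee that only
pushes and spills; vorbis_deinit: H6), given that the arena layer is carried too. -/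
theorem FB.carry (hL : G.Laws) {stored room : Int} (h : FB G A Blk Live mem f stored room) (ha : AllKept Blk mem mem')
    (hsh : Mem.EqOn 0xC00000 0xE00000 mem mem') (hado : G.ADO A mem' f) : FB G A Blk Live mem' f stored room :=
  ⟨h.env.eqOn hsh, VorbisOK.carries hL _ _ _ _ _ ha (fun _ hb => hb) (h.vorbis.ob1 hL).blk h.vorbis, hado, h.stored_nonneg,
    h.stored_le⟩

end Implications

end Vorbis
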